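-- pv_equiv track=rewrite | github.com/ssimono/gotypist-stats | gotypist_stats/report.py | _box_plot
-- ===== SOURCE A (Python) =====
-- def _box_plot(start: int, q25: int, med: int, q75: int, end: int) -> str:
--     conditions = (
--         (lambda i: i < start, " "),
--         (lambda i: i == med, "▣"),
--         (lambda i: i == start, "├"),
--         (lambda i: i == end, "┤"),
--         (lambda i: i >= q25 and i < med, "□"),
--         (lambda i: i > med and i <= q75, "□"),
--         (lambda i: i > start and i < q25, "─"),
--         (lambda i: i > q75 and i < end, "─"),
--     )
--
--     plot = ""
--     for i in range(end + 1):
--         for cond, char in conditions: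
--             if cond(i):
--                 plot += char
--                 break
--
--     return plot
-- ===== SOURCE B (Python) =====
-- def _box_plot(start: int, q25: int, med: int, q75: int, end: int) -> str:
--     def paint(cells, lo, hi, ch):
--         return [ch if lo <= i <= hi else c for i, c in enumerate(cells)]
--
--     cells = [None] * (end + 1)
--     # paint from lowest to highest priority; later paints overwrite earlier ones
--     cells = paint(cells, start + 1, q25 - 1, "─")
--     cells = paint(cells, q75 + 1, end - 1, "─")
--     cells = paint(cells, q25, med - 1, "□")
--     cells = paint(cells, med + 1, q75, "□")
--     cells = paint(cells, end, end, "┤")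
--     cells = paint(cells, start, start, "├")
--     cells = paint(cells, med, med, "▣")
--     cells = paint(cells, 0, start - 1, " ")
--     return "".join(c for c in cells if c is not None)
-- ===== Notes on version B (the rewrite author's own statement) =====
-- stated objective: alternative
-- what changed: Replaces the per-index first-match condition cascade by painting the whole cell row segment-by-segment in reverse priority order (dashes, box, endpoints, median, leading spaces), later paints overwriting earlier ones, then joining the painted cells.
import Mathlib
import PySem

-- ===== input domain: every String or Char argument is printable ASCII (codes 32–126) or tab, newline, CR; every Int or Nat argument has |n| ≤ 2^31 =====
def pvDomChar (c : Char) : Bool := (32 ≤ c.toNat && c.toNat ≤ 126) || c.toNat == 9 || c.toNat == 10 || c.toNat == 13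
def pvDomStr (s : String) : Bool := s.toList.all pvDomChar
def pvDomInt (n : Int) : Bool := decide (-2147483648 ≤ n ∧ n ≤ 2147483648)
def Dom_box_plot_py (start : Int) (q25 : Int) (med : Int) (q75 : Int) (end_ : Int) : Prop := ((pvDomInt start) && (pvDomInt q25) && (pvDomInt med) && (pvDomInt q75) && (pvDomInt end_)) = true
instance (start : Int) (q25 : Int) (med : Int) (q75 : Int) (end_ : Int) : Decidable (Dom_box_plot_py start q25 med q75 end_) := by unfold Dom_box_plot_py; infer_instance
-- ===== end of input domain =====

-- Header: B paints the cell row segment-by-segment in reverse priority order (later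
-- paints overwrite) and joins it, instead of A's per-index first-match condition cascade.

-- ===== PORT A =====
-- the inner 'for cond, char in conditions: if cond(i): plot += char; break' loop,
-- transliterated as the first-match chain over the same eight conditions in order;
-- the accumulated string is kept as a List Char and packed with String.mk at the end
def box_plot_py (start : Int) (q25 : Int) (med : Int) (q75 : Int) (end_ : Int) : String :=
  String.mk ((PySem.List.pyRange 0 (end_ + 1) 1).foldl (fun plot i =>
    if i < start then plot ++ [' ']
    else if i = med then plot ++ ['▣']
    else if i = start then plot ++ ['├']
    else if i = end_ then plot ++ ['┤']
    else if q25 ≤ i ∧ i < med then plot ++ ['□']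
    else if med < i ∧ i ≤ q75 then plot ++ ['□']
    else if start < i ∧ i < q25 then plot ++ ['─']
    else if q75 < i ∧ i < end_ then plot ++ ['─']
    else plot) [])

-- ===== PORT B =====
-- '[ch if lo <= i <= hi else c for i, c in enumerate(cells)]'
def paintB (lo : Int) (hi : Int) (ch : Char) (cells : List (Option Char)) : List (Option Char) :=
  (PySem.List.enumerate cells 0).map (fun p => if lo ≤ p.1 ∧ p.1 ≤ hi then some ch else p.2)

def box_plot_py_alt (start : Int) (q25 : Int) (med : Int) (q75 : Int) (end_ : Int) : String :=
  let cells0 := List.replicate (end_ + 1).toNat (none : Option Char)  -- [None] * (end + 1)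
  let c1 := paintB (start + 1) (q25 - 1) '─' cells0
  let c2 := paintB (q75 + 1) (end_ - 1) '─' c1
  let c3 := paintB q25 (med - 1) '□' c2
  let c4 := paintB (med + 1) q75 '□' c3
  let c5 := paintB end_ end_ '┤' c4
  let c6 := paintB start start '├' c5
  let c7 := paintB med med '▣' c6
  let c8 := paintB 0 (start - 1) ' ' c7
  String.mk (c8.filterMap id)          -- "".join(c for c in cells if c is not None)

-- ===== PRECONDITION & SPEC =====
def Spec_box_plot_py (start : Int) (q25 : Int) (med : Int) (q75 : Int) (end_ : Int) (out : String) : Prop := out = box_plot_py_alt start q25 med q75 end_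
instance (start : Int) (q25 : Int) (med : Int) (q75 : Int) (end_ : Int) (out : String) : Decidable (Spec_box_plot_py start q25 med q75 end_ out) := by unfold Spec_box_plot_py; infer_instance

-- ===== CLAIM (what is proved, stated in full; the proofs are below) =====
def Claim_equal_box_plot_py : Prop := ∀ (start : Int) (q25 : Int) (med : Int) (q75 : Int) (end_ : Int), Dom_box_plot_py start q25 med q75 end_ → Spec_box_plot_py start q25 med q75 end_ (box_plot_py start q25 med q75 end_)

-- ===== LEMMAS AND PROOFS =====

-- A's per-index emission: the first-match cascade, as a (possibly empty) char list
def cellA (start q25 med q75 end_ i : Int) : List Char :=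
  if i < start then [' ']
  else if i = med then ['▣']
  else if i = start then ['├']
  else if i = end_ then ['┤']
  else if q25 ≤ i ∧ i < med then ['□']
  else if med < i ∧ i ≤ q75 then ['□']
  else if start < i ∧ i < q25 then ['─']
  else if q75 < i ∧ i < end_ then ['─']
  else []

-- B's per-index cell after all eight paints (last paint = outermost if)
def cellB (start q25 med q75 end_ j : Int) : Option Char :=
  if 0 ≤ j ∧ j ≤ start - 1 then some ' '
  else if med ≤ j ∧ j ≤ med then some '▣'
  else if start ≤ j ∧ j ≤ start then some '├'
  else if end_ ≤ j ∧ j ≤ end_ then some '┤'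
  else if med + 1 ≤ j ∧ j ≤ q75 then some '□'
  else if q25 ≤ j ∧ j ≤ med - 1 then some '□'
  else if q75 + 1 ≤ j ∧ j ≤ end_ - 1 then some '─'
  else if start + 1 ≤ j ∧ j ≤ q25 - 1 then some '─'
  else none

theorem paintB_map_pyRange (n : Nat) (g : Int → Option Char) (lo hi : Int) (ch : Char) :
    paintB lo hi ch ((PySem.List.pyRange 0 (n : Int) 1).map g)
      = (PySem.List.pyRange 0 (n : Int) 1).map
          (fun j => if lo ≤ j ∧ j ≤ hi then some ch else g j) := by
  unfold paintB
  rw [PySem.List.enumerate_eq_map_pyRange _ none]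
  have hlen : (PySem.List.len (((PySem.List.pyRange 0 (n : Int) 1).map g))) = (n : Int) := by
    simp [PySem.List.len, PySem.List.length_pyRange_one]
  rw [hlen, List.map_map]
  refine List.map_congr_left (fun j hj => ?_)
  rcases (PySem.List.mem_pyRange_one).1 hj with ⟨h0, hn⟩
  simp only [Function.comp]
  rw [PySem.List.pyGetD_map_pyRange_of_nonneg g (n : Int) j none h0 hn]

theorem replicate_eq_map_pyRange (n : Nat) :
    List.replicate n (none : Option Char)
      = (PySem.List.pyRange 0 (n : Int) 1).map (fun _ => none) := by
  rw [List.map_const']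
  simp [PySem.List.length_pyRange_one]

theorem flatMap_toList_eq_filterMap (l : List Int) (F : Int → Option Char) :
    l.flatMap (fun i => (F i).toList) = l.filterMap F := by
  induction l with
  | nil => rfl
  | cons x xs ih =>
    simp only [List.flatMap_cons, List.filterMap_cons, ih]
    cases F x <;> simp

set_option maxHeartbeats 1000000 in
theorem cellA_eq_cellB (start q25 med q75 end_ i : Int) (h0 : 0 ≤ i) :
    cellA start q25 med q75 end_ i = (cellB start q25 med q75 end_ i).toList := by
  unfold cellA cellB
  split_ifs <;> first | rfl | omega

theorem alt_eq (start q25 med q75 end_ : Int) :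
    box_plot_py_alt start q25 med q75 end_
      = String.mk ((PySem.List.pyRange 0 (((end_ + 1).toNat : Int)) 1).filterMap
          (cellB start q25 med q75 end_)) := by
  unfold box_plot_py_alt
  simp only [replicate_eq_map_pyRange, paintB_map_pyRange, List.filterMap_map]
  congr 1

theorem a_eq (start q25 med q75 end_ : Int) :
    box_plot_py start q25 med q75 end_
      = String.mk ((PySem.List.pyRange 0 (end_ + 1) 1).flatMap
          (cellA start q25 med q75 end_)) := by
  unfold box_plot_py
  have hstep : (fun (plot : List Char) (i : Int) =>
      if i < start then plot ++ [' ']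
      else if i = med then plot ++ ['▣']
      else if i = start then plot ++ ['├']
      else if i = end_ then plot ++ ['┤']
      else if q25 ≤ i ∧ i < med then plot ++ ['□']
      else if med < i ∧ i ≤ q75 then plot ++ ['□']
      else if start < i ∧ i < q25 then plot ++ ['─']
      else if q75 < i ∧ i < end_ then plot ++ ['─']
      else plot) = fun plot i => plot ++ cellA start q25 med q75 end_ i := by
    funext plot i
    unfold cellA
    split_ifs <;> simp
  rw [hstep, PySem.List.foldl_append_eq_flatMap, List.nil_append]

theorem box_plot_py_lists (start q25 med q75 end_ : Int) :
    box_plot_py start q25 med q75 end_ = box_plot_py_alt start q25 med q75 end_ := by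
  rw [a_eq, alt_eq]
  have hr : PySem.List.pyRange 0 (end_ + 1) 1
      = PySem.List.pyRange 0 (((end_ + 1).toNat : Int)) 1 := by
    by_cases h : 0 ≤ end_ + 1
    · rw [Int.toNat_of_nonneg h]
    · rw [PySem.List.pyRange_one_eq_nil (by omega), PySem.List.pyRange_one_eq_nil (by omega)]
  rw [hr, ← flatMap_toList_eq_filterMap]
  congr 1
  refine List.flatMap_congr (fun i hi => ?_)
  rcases (PySem.List.mem_pyRange_one).1 hi with ⟨h0, _⟩
  exact cellA_eq_cellB start q25 med q75 end_ i h0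

-- ===== VERDICT (by name: the statement is the Claim_ definition above) =====
theorem box_plot_py_spec : Claim_equal_box_plot_py := by
  intro start q25 med q75 end_ _
  unfold Spec_box_plot_py
  exact box_plot_py_lists start q25 med q75 end_
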